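-- pv_equiv track=rewrite | github.com/maxmurtazin/Ant-RH | core/ncg_braid_spectral.py | enumerate_braid_words
-- ===== SOURCE A (Python) =====
-- from typing import Any, Iterable, List, Sequence, Tuple, Dict, Optional, Union
--
-- BraidGen = Tuple[int, int]  # (i, sign), represents sigma_i^{sign}, sign in {-1,+1}
--
-- BraidWord = Tuple[BraidGen, ...]
--
-- def reduce_free_inverse(word: BraidWord) -> BraidWord:
--     """Simple cancellation sigma_i sigma_i^{-1} -> e. Does not solve full braid normal form."""
--     stack: List[BraidGen] = []
--     for g in word:
--         if stack and stack[-1][0] == g[0] and stack[-1][1] == -g[1]: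
--             stack.pop()
--         else:
--             stack.append(g)
--     return tuple(stack)
--
-- def enumerate_braid_words(n_strands: int, max_len: int, limit: int) -> List[BraidWord]:
--     """
--     Deterministic BFS-like enumeration with inverse cancellations removed.
--     Useful for smoke tests and finite truncations of l2(B_n).
--     """
--     gens: List[BraidGen] = []
--     for i in range(1, n_strands):
--         gens.append((i, +1))
--         gens.append((i, -1))
--
--     words: List[BraidWord] = [tuple()]
--     frontier: List[BraidWord] = [tuple()]
--     seen = {tuple()}
--
--     while frontier and len(words) < limit:
--         new_frontier: List[BraidWord] = []
--         for w in frontier: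
--             if len(w) >= max_len:
--                 continue
--             for g in gens:
--                 nw = reduce_free_inverse(w + (g,))
--                 if len(nw) <= max_len and nw not in seen:
--                     seen.add(nw)
--                     words.append(nw)
--                     new_frontier.append(nw)
--                     if len(words) >= limit:
--                         break
--             if len(words) >= limit:
--                 break
--         frontier = new_frontier
--     return words[:limit]
-- ===== SOURCE B (Python) =====
-- def _children(frontier, gens):
--     # lazily yield the non-cancelling one-letter extensions, in order
--     for w in frontier:
--         last = w[-1] if w else None
--         for g in gens:
--             if last is not None and last[0] == g[0] and last[1] == -g[1]:
--                 continue
--             yield w + (g,)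
--
-- def enumerate_braid_words(n_strands, max_len, limit):
--     # Level-by-level BFS: a parent word is already freely reduced, so appending a
--     # generator needs only an O(1) last-letter cancellation check instead of a full
--     # rescan, and no 'seen' set is needed (distinct reduced words are distinct tuples);
--     # each level is generated lazily and cut off once 'limit' words exist.
--     gens = [(i, s) for i in range(1, n_strands) for s in (1, -1)]
--     words = [()]
--     frontier = [()]
--     level = 0
--     while frontier and level < max_len and len(words) < limit:
--         need = limit - len(words)
--         nxt = []
--         for nw in _children(frontier, gens):
--             if len(nxt) >= need:
--                 break
--             nxt.append(nw)
--         frontier = nxt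
--         words.extend(nxt)
--         level += 1
--     return words[:limit]
-- ===== Notes on version B (the rewrite author's own statement) =====
-- stated objective: faster
-- what changed: A re-runs a full stack-based free reduction of w+(g,) and a 'seen'-set membership test for every candidate edge; B exploits that BFS parents are already reduced, so appending a generator needs only an O(1) last-letter cancellation check, and drops the 'seen' set and the reduction pass entirely (distinct reduced words are distinct tuples, and a cancellation always lands on an already-enumerated word).
import Mathlib
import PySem

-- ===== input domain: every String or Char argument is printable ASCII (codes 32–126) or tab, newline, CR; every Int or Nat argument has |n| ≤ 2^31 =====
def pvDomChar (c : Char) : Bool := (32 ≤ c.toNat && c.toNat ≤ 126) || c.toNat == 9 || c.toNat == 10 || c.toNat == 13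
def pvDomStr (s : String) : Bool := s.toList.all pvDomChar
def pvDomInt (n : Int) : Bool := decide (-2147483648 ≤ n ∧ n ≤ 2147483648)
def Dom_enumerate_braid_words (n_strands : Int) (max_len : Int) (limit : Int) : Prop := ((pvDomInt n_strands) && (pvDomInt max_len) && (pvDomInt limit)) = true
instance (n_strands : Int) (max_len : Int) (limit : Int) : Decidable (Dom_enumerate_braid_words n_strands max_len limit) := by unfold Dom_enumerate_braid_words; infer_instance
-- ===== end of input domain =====

-- B replaces A's per-edge full free reduction and 'seen'-set lookups by an O(1)
-- last-letter cancellation check on already-reduced parents (measured constant-factor speedup).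

-- ===== PORT A =====
abbrev pvW := List (Int × Int)
abbrev pvSt := List pvW × PySem.Set pvW × List pvW

-- Python's stack (append/pop at the end) is kept REVERSED (head = stack[-1]); the result is re-reversed.
def pvStep (stack : pvW) (g : Int × Int) : pvW :=
  match stack with
  | t :: rest => if t.1 = g.1 ∧ t.2 = -g.2 then rest else g :: t :: rest
  | [] => [g]

def reduce_free_inverse (word : pvW) : pvW :=
  (word.foldl pvStep []).reverse

-- inner 'for g in gens' loop (with its break on len(words) >= limit)
def pvAGens (max_len limit : Int) (w : pvW) : List (Int × Int) → pvSt → pvSt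
  | [], st => st
  | g :: gs, (words, seen, nf) =>
      let nw := reduce_free_inverse (w ++ [g])
      if (nw.length : Int) ≤ max_len ∧ nw ∉ seen then
        let words' := words ++ [nw]
        let seen' := PySem.Set.add seen nw
        let nf' := nf ++ [nw]
        if limit ≤ (words'.length : Int) then (words', seen', nf')
        else pvAGens max_len limit w gs (words', seen', nf')
      else pvAGens max_len limit w gs (words, seen, nf)

-- 'for w in frontier' loop (with its break on len(words) >= limit)
def pvAFrontier (gens : List (Int × Int)) (max_len limit : Int) : List pvW → pvSt → pvSt
  | [], st => st
  | w :: ws, (words, seen, nf) =>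
      if max_len ≤ (w.length : Int) then pvAFrontier gens max_len limit ws (words, seen, nf)
      else
        let st := pvAGens max_len limit w gens (words, seen, nf)
        if limit ≤ (st.1.length : Int) then st
        else pvAFrontier gens max_len limit ws st

-- the 'while frontier and len(words) < limit' loop; fuel limit.toNat + 2 suffices: every run
-- of the body either appends at least one word (at most limit - 1 times) or empties the frontier.
def pvALoop (gens : List (Int × Int)) (max_len limit : Int) :
    Nat → List pvW → List pvW → PySem.Set pvW → List pvW
  | 0, _, words, _ => words
  | f + 1, frontier, words, seen =>
      if frontier ≠ [] ∧ (words.length : Int) < limit then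
        let st := pvAFrontier gens max_len limit frontier (words, seen, [])
        pvALoop gens max_len limit f st.2.2 st.1 st.2.1
      else words

def enumerate_braid_words (n_strands : Int) (max_len : Int) (limit : Int) : List (List (Int × Int)) :=
  let gens := (PySem.List.pyRange 1 n_strands 1).foldl (fun acc i => acc ++ [(i, 1), (i, -1)]) []
  PySem.List.slice (pvALoop gens max_len limit (limit.toNat + 2) [[]] [[]] (PySem.Set.ofList [[]]))
    none (some limit)

-- ===== PORT B =====
-- 'w and w[-1][0] == g[0] and w[-1][1] == -g[1]'
def pvCancels (w : pvW) (g : Int × Int) : Bool :=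
  match w.getLast? with
  | none => false
  | some t => t.1 == g.1 && t.2 == -g.2

-- _children: 'for w in frontier: for g in gens: if cancels: continue; yield w + (g,)'
def pvExpand (gens : List (Int × Int)) (frontier : List pvW) : List pvW :=
  frontier.flatMap (fun w => (gens.filter (fun g => !pvCancels w g)).map (fun g => w ++ [g]))

-- 'while frontier and level < max_len and len(words) < limit'; the counter is max_len.toNat - level;
-- the 'for nw in _children(...)' loop cut off at 'need' is the take of the lazily generated list
def pvBLoop (gens : List (Int × Int)) (limit : Int) : Nat → List pvW → List pvW → List pvW
  | 0, _, words => words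
  | n + 1, frontier, words =>
      if frontier ≠ [] ∧ (words.length : Int) < limit then
        let nf := (pvExpand gens frontier).take (limit - (words.length : Int)).toNat
        pvBLoop gens limit n nf (words ++ nf)
      else words

def enumerate_braid_words_alt (n_strands : Int) (max_len : Int) (limit : Int) : List (List (Int × Int)) :=
  let gens := (PySem.List.pyRange 1 n_strands 1).flatMap (fun i => [(i, 1), (i, -1)])
  PySem.List.slice (pvBLoop gens limit max_len.toNat [[]] [[]]) none (some limit)

-- ===== PRECONDITION & SPEC =====
def Spec_enumerate_braid_words (n_strands : Int) (max_len : Int) (limit : Int) (out : List (List (Int × Int))) : Prop := out = enumerate_braid_words_alt n_strands max_len limit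
instance (n_strands : Int) (max_len : Int) (limit : Int) (out : List (List (Int × Int))) : Decidable (Spec_enumerate_braid_words n_strands max_len limit out) := by unfold Spec_enumerate_braid_words; infer_instance

-- ===== CLAIM (what is proved, stated in full; the proofs are below) =====
def Claim_equal_enumerate_braid_words : Prop := ∀ (n_strands : Int) (max_len : Int) (limit : Int), Dom_enumerate_braid_words n_strands max_len limit → Spec_enumerate_braid_words n_strands max_len limit (enumerate_braid_words n_strands max_len limit)

-- ===== LEMMAS AND PROOFS =====

def pvRed (w : pvW) : Prop := List.IsChain (fun a b => ¬(a.1 = b.1 ∧ a.2 = -b.2)) w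

theorem pv_foldl_red (w : pvW) (hw : pvRed w) : w.foldl pvStep [] = w.reverse := by
  induction w using List.reverseRecOn with
  | nil => rfl
  | append_singleton ys y ih =>
    rw [pvRed, List.isChain_append] at hw
    rw [List.foldl_append, ih hw.1, List.reverse_append]
    simp only [List.foldl_cons, List.foldl_nil]
    cases hys : ys.reverse with
    | nil => rfl
    | cons t rest =>
      have ht : ys.getLast? = some t := by
        rw [← List.head?_reverse, hys]; rfl
      have := hw.2.2 t (by rw [ht]; rfl) y (by rfl)
      simp [pvStep, this]

theorem pv_reduce_append (w : pvW) (g : Int × Int) (hw : pvRed w) :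
    reduce_free_inverse (w ++ [g]) = if pvCancels w g then w.dropLast else w ++ [g] := by
  rw [reduce_free_inverse, List.foldl_append, pv_foldl_red w hw]
  simp only [List.foldl_cons, List.foldl_nil]
  cases hys : w.reverse with
  | nil =>
    have : w = [] := by simpa using congrArg List.reverse hys
    subst this; simp [pvStep, pvCancels]
  | cons t rest =>
    have ht : w.getLast? = some t := by rw [← List.head?_reverse, hys]; rfl
    have hrest : w.dropLast = rest.reverse := by
      have := congrArg List.reverse hys
      simp at this
      rw [this]
      cases rest with
      | nil => simp
      | cons a b => simp
    rw [pvCancels, ht]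
    by_cases hc : t.1 = g.1 ∧ t.2 = -g.2
    · simp [pvStep, hc, hrest]
    · have : (t.1 == g.1 && t.2 == -g.2) = false := by
        simp only [Bool.and_eq_false_iff, beq_eq_false_iff_ne, ne_eq]; tauto
      simp [pvStep, hc, this, ← hys]

theorem pv_red_append (w : pvW) (g : Int × Int) (hw : pvRed w) (hc : pvCancels w g = false) :
    pvRed (w ++ [g]) := by
  rw [pvRed, List.isChain_append]
  refine ⟨hw, by simp, ?_⟩
  intro x hx y hy
  simp only [List.head?_cons, Option.mem_def, Option.some.injEq] at hy
  subst hy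
  rw [pvCancels] at hc
  rw [Option.mem_def] at hx
  rw [hx] at hc
  simp only [Bool.and_eq_false_iff, beq_eq_false_iff_ne, ne_eq] at hc
  tauto

def pvExt (gens : List (Int × Int)) (w : pvW) : List pvW :=
  (gens.filter (fun g => !pvCancels w g)).map (fun g => w ++ [g])

theorem pv_aGens_eq (max_len limit : Int) (w : pvW)
    (hred : pvRed w) (hlen : (w.length : Int) < max_len) :
    ∀ (gs : List (Int × Int)) (words seen nf : List pvW) (k : Nat),
    w.dropLast ∈ seen →
    (∀ g ∈ gs, w ++ [g] ∉ seen) →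
    gs.Nodup →
    words.length + k = limit.toNat → 0 < k →
    ∃ seen', pvAGens max_len limit w gs (words, seen, nf) =
        (words ++ (pvExt gs w).take k, seen', nf ++ (pvExt gs w).take k) ∧
      ∀ y, (y ∈ seen' ↔ y ∈ seen ∨ y ∈ (pvExt gs w).take k) := by
  intro gs
  induction gs with
  | nil =>
    intro words seen nf k _ _ _ _ _
    exact ⟨seen, by simp [pvAGens, pvExt], by simp [pvExt]⟩
  | cons g gs ih =>
    intro words seen nf k hdl hfresh hnd hk hk0
    have hred' := pv_reduce_append w g hred
    by_cases hc : pvCancels w g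
    · -- cancellation: nw = w.dropLast ∈ seen, skipped
      have hq : pvExt (g :: gs) w = pvExt gs w := by
        simp [pvExt, hc]
      rw [hq]
      have := ih words seen nf k hdl (fun g' hg' => hfresh g' (by simp [hg'])) hnd.of_cons hk hk0
      simpa [pvAGens, hred', hc, hdl] using this
    · -- fresh word appended
      have hcb : pvCancels w g = false := by simpa using hc
      have hnw : reduce_free_inverse (w ++ [g]) = w ++ [g] := by simp [hred', hcb]
      have hlen2 : ((w ++ [g]).length : Int) ≤ max_len := by
        simp only [List.length_append, List.length_cons, List.length_nil]
        push_cast; omega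
      have hfr : w ++ [g] ∉ seen := hfresh g (by simp)
      have hq : pvExt (g :: gs) w = (w ++ [g]) :: pvExt gs w := by
        simp [pvExt, hcb]
      have hadd : PySem.Set.add seen (w ++ [g]) = seen ++ [w ++ [g]] :=
        PySem.Set.add_of_not_mem hfr
      by_cases hbrk : limit ≤ ((words ++ [w ++ [g]]).length : Int)
      · -- break: k = 1
        have hk1 : k = 1 := by
          simp only [List.length_append, List.length_cons, List.length_nil] at hbrk
          omega
        refine ⟨seen ++ [w ++ [g]], ?_, ?_⟩
        · rw [pvAGens]
          simp only [hnw, hlen2, hfr, not_false_iff, and_self, hadd, hbrk, if_pos]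
          rw [hq, hk1]
          simp
        · intro y; rw [hq, hk1]; simp
      · -- continue with k - 1
        have hkk : 1 < k := by
          simp only [List.length_append, List.length_cons, List.length_nil] at hbrk
          omega
        have hfresh' : ∀ g' ∈ gs, w ++ [g'] ∉ seen ++ [w ++ [g]] := by
          intro g' hg'
          simp only [List.mem_append, List.mem_singleton]
          rintro (h | h)
          · exact hfresh g' (by simp [hg']) h
          · have : g' = g := by simpa using h
            exact (List.nodup_cons.mp hnd).1 (this ▸ hg')
        have hdl' : w.dropLast ∈ seen ++ [w ++ [g]] := by simp [hdl]
        have := ih (words ++ [w ++ [g]]) (seen ++ [w ++ [g]]) (nf ++ [w ++ [g]]) (k - 1)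
          hdl' hfresh' hnd.of_cons (by simp; omega) (by omega)
        obtain ⟨seen', heq, hmem⟩ := this
        refine ⟨seen', ?_, ?_⟩
        · rw [pvAGens]
          simp only [hnw, hlen2, hfr, not_false_iff, and_self, if_true, hadd, hbrk, if_neg,
            not_false_iff]
          rw [heq, hq]
          have htk : ((w ++ [g]) :: pvExt gs w).take k = (w ++ [g]) :: (pvExt gs w).take (k - 1) := by
            cases k with
            | zero => omega
            | succ m => simp
          rw [htk]; simp
        · intro y
          rw [hmem y, hq]
          have htk : ((w ++ [g]) :: pvExt gs w).take k = (w ++ [g]) :: (pvExt gs w).take (k - 1) := by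
            cases k with
            | zero => omega
            | succ m => simp
          rw [htk]; simp
          tauto

theorem pv_aFrontier_skip (gens : List (Int × Int)) (max_len limit : Int) :
    ∀ (ws : List pvW) (st : pvSt), (∀ w ∈ ws, max_len ≤ (w.length : Int)) →
    pvAFrontier gens max_len limit ws st = st := by
  intro ws
  induction ws with
  | nil => intro st _; rfl
  | cons w ws ih =>
    intro st h
    obtain ⟨words, seen, nf⟩ := st
    rw [pvAFrontier]
    simp only [h w (by simp), if_pos]
    exact ih _ (fun w' hw' => h w' (by simp [hw']))

theorem pv_aFrontier_eq (gens : List (Int × Int)) (max_len limit : Int) (ℓ : Nat)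
    (hgnd : gens.Nodup) :
    ∀ (ws : List pvW) (words seen nf : List pvW) (k : Nat),
    (∀ w ∈ ws, w.length = ℓ ∧ pvRed w ∧ w.dropLast ∈ seen) →
    ws.Nodup →
    ((ℓ : Int) < max_len) →
    (∀ w ∈ ws, ∀ g ∈ gens, w ++ [g] ∉ seen) →
    words.length + k = limit.toNat → 0 < k →
    ∃ seen', pvAFrontier gens max_len limit ws (words, seen, nf) =
        (words ++ (pvExpand gens ws).take k, seen', nf ++ (pvExpand gens ws).take k) ∧
      ∀ y, (y ∈ seen' ↔ y ∈ seen ∨ y ∈ (pvExpand gens ws).take k) := by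
  intro ws
  induction ws with
  | nil =>
    intro words seen nf k _ _ _ _ _ _
    exact ⟨seen, by simp [pvAFrontier, pvExpand], by simp [pvExpand]⟩
  | cons w ws ih =>
    intro words seen nf k hws hnd hml hfresh hk hk0
    obtain ⟨hwl, hwr, hwd⟩ := hws w (by simp)
    have hskip : ¬ max_len ≤ (w.length : Int) := by rw [hwl]; omega
    obtain ⟨seen1, heq1, hmem1⟩ := pv_aGens_eq max_len limit w hwr (by rw [hwl]; exact hml)
      gens words seen nf k hwd (fun g hg => hfresh w (by simp) g hg) hgnd hk hk0
    have hflat : pvExpand gens (w :: ws) = pvExt gens w ++ pvExpand gens ws := by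
      simp [pvExpand, pvExt]
    by_cases hbrk : limit ≤ ((words ++ (pvExt gens w).take k).length : Int)
    · -- limit reached within w's expansions: return, and the take-k truncates inside pvExt gens w
      have hkle : k ≤ (pvExt gens w).length := by
        simp only [List.length_append, List.length_take] at hbrk
        omega
      refine ⟨seen1, ?_, ?_⟩
      · rw [pvAFrontier]
        simp only [hskip, if_neg, not_false_iff, heq1, hbrk, if_pos]
        rw [hflat, List.take_append_of_le_length hkle]
      · intro y
        rw [hflat, List.take_append_of_le_length hkle]
        exact hmem1 y
    · -- w fully expanded without reaching limit: recurse
      have hlt : (pvExt gens w).length < k := by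
        simp only [List.length_append, List.length_take] at hbrk
        omega
      have htk : (pvExt gens w).take k = pvExt gens w := List.take_of_length_le (by omega)
      rw [htk] at heq1 hmem1 hbrk
      have hws' : ∀ w' ∈ ws, w'.length = ℓ ∧ pvRed w' ∧ w'.dropLast ∈ seen1 := by
        intro w' hw'
        obtain ⟨h1, h2, h3⟩ := hws w' (by simp [hw'])
        exact ⟨h1, h2, (hmem1 _).mpr (Or.inl h3)⟩
      have hext_len : ∀ x ∈ pvExt gens w, x.length = ℓ + 1 := by
        intro x hx
        simp only [pvExt, List.mem_map, List.mem_filter] at hx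
        obtain ⟨g, _, rfl⟩ := hx
        simp [hwl]
      have hfresh' : ∀ w' ∈ ws, ∀ g ∈ gens, w' ++ [g] ∉ seen1 := by
        intro w' hw' g hg hmem
        rcases (hmem1 _).mp hmem with h | h
        · exact hfresh w' (by simp [hw']) g hg h
        · -- w' ++ [g] ∈ pvExt gens w would force w' = w, contradicting Nodup
          simp only [pvExt, List.mem_map, List.mem_filter] at h
          obtain ⟨g0, _, hg0⟩ := h
          have heqw : w = w' := by
            have h1 := (hws' w' hw').1
            have h2 := congrArg (List.take ℓ) hg0
            rwa [List.take_append_of_le_length (by omega),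
              List.take_append_of_le_length (by omega),
              List.take_of_length_le (by omega), List.take_of_length_le (by omega)] at h2
          exact (List.nodup_cons.mp hnd).1 (heqw ▸ hw')
      obtain ⟨seen2, heq2, hmem2⟩ := ih (words ++ pvExt gens w) seen1 (nf ++ pvExt gens w)
        (k - (pvExt gens w).length) hws' hnd.of_cons hml hfresh' (by simp; omega) (by omega)
      have htk2 : List.take k (pvExt gens w ++ pvExpand gens ws) =
          pvExt gens w ++ List.take (k - (pvExt gens w).length) (pvExpand gens ws) := by
        rw [List.take_append, List.take_of_length_le (le_of_lt hlt)]
      refine ⟨seen2, ?_, ?_⟩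
      · rw [pvAFrontier]
        simp only [hskip, if_neg, not_false_iff, heq1, hbrk, heq2]
        rw [hflat, htk2]
        simp
      · intro y
        rw [hmem2 y, hflat, htk2]
        simp only [List.mem_append]
        rw [hmem1 y]
        tauto

theorem pv_mem_expand (gens : List (Int × Int)) (fr : List pvW) (x : pvW) :
    x ∈ pvExpand gens fr ↔ ∃ w ∈ fr, ∃ g ∈ gens, pvCancels w g = false ∧ x = w ++ [g] := by
  simp only [pvExpand, List.mem_flatMap, List.mem_map, List.mem_filter, Bool.not_eq_eq_eq_not,
    Bool.not_true]
  constructor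
  · rintro ⟨w, hw, g, ⟨hg, hc⟩, rfl⟩
    exact ⟨w, hw, g, hg, hc, rfl⟩
  · rintro ⟨w, hw, g, hg, hc, rfl⟩
    exact ⟨w, hw, g, ⟨hg, hc⟩, rfl⟩

theorem pv_nodup_expand (gens : List (Int × Int)) (hg : gens.Nodup) (ℓ : Nat) :
    ∀ (fr : List pvW), fr.Nodup → (∀ w ∈ fr, w.length = ℓ) → (pvExpand gens fr).Nodup := by
  intro fr
  induction fr with
  | nil => intro _ _; simp [pvExpand]
  | cons w ws ih =>
    intro hnd hlen
    have : pvExpand gens (w :: ws) = pvExt gens w ++ pvExpand gens ws := by simp [pvExpand, pvExt]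
    rw [this, List.nodup_append]
    refine ⟨?_, ih hnd.of_cons (fun w' hw' => hlen w' (by simp [hw'])), ?_⟩
    · exact (List.Nodup.filter _ hg).map (fun a b hab => by simpa using hab)
    · intro x hx y hy
      simp only [pvExt, List.mem_map, List.mem_filter] at hx
      obtain ⟨g, _, rfl⟩ := hx
      rw [pv_mem_expand] at hy
      obtain ⟨w', hw', g', _, _, rfl⟩ := hy
      intro hgeq
      have hl : w.length = ℓ := hlen w (by simp)
      have hl' : w'.length = ℓ := hlen w' (by simp [hw'])
      have : w = w' := by
        have h2 := congrArg (List.take ℓ) hgeq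
        rwa [List.take_append_of_le_length (by omega), List.take_append_of_le_length (by omega),
          List.take_of_length_le (by omega), List.take_of_length_le (by omega)] at h2
      exact (List.nodup_cons.mp hnd).1 (this ▸ hw')

theorem pv_sync (gens : List (Int × Int)) (max_len limit : Int) (hg : gens.Nodup) :
    ∀ (f : Nat), ∀ (n ℓ : Nat) (frontier words seen : List pvW),
    (∀ w ∈ frontier, w.length = ℓ ∧ pvRed w ∧ w.dropLast ∈ seen ∧ w ∈ seen) →
    frontier.Nodup →
    (∀ y ∈ seen, y.length ≤ ℓ) →
    ((ℓ : Int) + n = max_len ∨ (n = 0 ∧ max_len ≤ (ℓ : Int))) →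
    limit.toNat + 2 ≤ words.length + f →
    pvALoop gens max_len limit f frontier words seen = pvBLoop gens limit n frontier words := by
  intro f
  induction f with
  | zero =>
    intro n ℓ frontier words seen _ _ _ _ hf
    have hlt : ¬ ((words.length : Int) < limit) := by omega
    rw [pvALoop]
    cases n with
    | zero => rfl
    | succ m => rw [pvBLoop, if_neg (by tauto)]
  | succ f ihf =>
    intro n ℓ frontier words seen hfr hnd hseenlen hn hf
    by_cases hC : frontier ≠ [] ∧ (words.length : Int) < limit
    · obtain ⟨hfne, hwlt⟩ := hC
      have hf1 : 1 ≤ f := by omega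
      by_cases hml : (ℓ : Int) < max_len
      · -- expanding level
        obtain ⟨m, rfl⟩ : ∃ m, n = m + 1 := by
          rcases hn with h1 | ⟨h0, h2⟩
          · exact ⟨n - 1, by omega⟩
          · omega
        have hk : words.length + (limit.toNat - words.length) = limit.toNat ∧
            0 < limit.toNat - words.length := by omega
        obtain ⟨seen', heqF, hmemF⟩ := pv_aFrontier_eq gens max_len limit ℓ hg frontier
          words seen [] (limit.toNat - words.length)
          (fun w hw => ⟨(hfr w hw).1, (hfr w hw).2.1, (hfr w hw).2.2.1⟩) hnd hml
          (fun w hw g _ hmem => by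
            have h1 := hseenlen _ hmem
            have h2 := (hfr w hw).1
            simp only [List.length_append, List.length_cons, List.length_nil] at h1
            omega)
          hk.1 hk.2
        set full := pvExpand gens frontier with hfull_def
        set q := full.take (limit.toNat - words.length) with hq_def
        have hstepA : pvALoop gens max_len limit (f + 1) frontier words seen =
            pvALoop gens max_len limit f q (words ++ q) seen' := by
          rw [pvALoop, if_pos ⟨hfne, hwlt⟩, heqF]
          simp
        have hstepB : pvBLoop gens limit (m + 1) frontier words =
            pvBLoop gens limit m q (words ++ q) := by
          rw [pvBLoop, if_pos ⟨hfne, hwlt⟩]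
          have : (limit - ((words.length : Int))).toNat = limit.toNat - words.length := by omega
          rw [this]
        rw [hstepA, hstepB]
        by_cases hfe : full = []
        · rw [hfe] at hq_def
          simp only [List.take_nil] at hq_def
          rw [hq_def]
          obtain ⟨f', rfl⟩ : ∃ f', f = f' + 1 := ⟨f - 1, by omega⟩
          rw [pvALoop, if_neg (by simp)]
          cases m with
          | zero => simp [pvBLoop]
          | succ m' => rw [pvBLoop, if_neg (by simp)]
        · by_cases hbig : limit ≤ (((words ++ q).length : Int))
          · -- limit reached in this level: both loops return words ++ q
            obtain ⟨f', rfl⟩ : ∃ f', f = f' + 1 := ⟨f - 1, by omega⟩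
            rw [pvALoop, if_neg (by push Not; intro _; omega)]
            cases m with
            | zero => rfl
            | succ m' => rw [pvBLoop, if_neg (by push Not; intro _; omega)]
          · -- whole level added; recurse
            have hlt : full.length < limit.toNat - words.length := by
              simp only [hq_def, List.length_append, List.length_take] at hbig
              omega
            have hqf : q = full := by rw [hq_def]; exact List.take_of_length_le (by omega)
            rw [hqf]
            apply ihf m (ℓ + 1) full (words ++ full) seen'
            · intro w' hw'
              rw [pv_mem_expand] at hw'
              obtain ⟨w, hw, g0, hg0, hc0, rfl⟩ := hw'
              obtain ⟨hL, hR, _, hS⟩ := hfr w hw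
              refine ⟨by simp [hL], pv_red_append w g0 hR hc0, ?_, ?_⟩
              · rw [List.dropLast_concat]
                exact (hmemF w).mpr (Or.inl hS)
              · exact (hmemF _).mpr (Or.inr (by
                  rw [hqf, hfull_def, pv_mem_expand]
                  exact ⟨w, hw, g0, hg0, hc0, rfl⟩))
            · exact pv_nodup_expand gens hg ℓ frontier hnd (fun w hw => (hfr w hw).1)
            · intro y hy
              rcases (hmemF y).mp hy with h | h
              · exact Nat.le_succ_of_le (hseenlen y h)
              · rw [hqf, hfull_def, pv_mem_expand] at h
                obtain ⟨w, hw, g0, _, _, rfl⟩ := h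
                simp [(hfr w hw).1]
            · left; push_cast; rcases hn with h1 | ⟨h0, h2⟩
              · push_cast at h1; omega
              · omega
            · have : 1 ≤ full.length := List.length_pos_of_ne_nil hfe
              simp only [List.length_append]; omega
      · -- ℓ ≥ max_len: A skips the whole frontier once; B is already done (n = 0)
        have hn0 : n = 0 := by rcases hn with h1 | ⟨h0, _⟩; omega; exact h0
        rw [hn0]
        rw [pvALoop, if_pos ⟨hfne, hwlt⟩,
          pv_aFrontier_skip gens max_len limit frontier (words, seen, [])
            (fun w hw => by rw [(hfr w hw).1]; omega)]
        obtain ⟨f', rfl⟩ : ∃ f', f = f' + 1 := ⟨f - 1, by omega⟩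
        rw [pvALoop, if_neg (by simp)]
        rfl
    · rw [pvALoop, if_neg hC]
      cases n with
      | zero => rfl
      | succ m => rw [pvBLoop, if_neg hC]

theorem pv_gens_eq (n_strands : Int) :
    (PySem.List.pyRange 1 n_strands 1).foldl (fun acc i => acc ++ [(i, 1), (i, -1)]) [] =
      (PySem.List.pyRange 1 n_strands 1).flatMap (fun i => [(i, 1), (i, -1)]) := by
  rw [PySem.List.foldl_append_eq_flatMap]
  simp

theorem pv_gens_nodup_aux : ∀ (l : List Int), l.Pairwise (· < ·) →
    (l.flatMap (fun i => [((i : Int), (1 : Int)), (i, -1)])).Nodup := by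
  intro l
  induction l with
  | nil => simp
  | cons a l ih =>
    intro hp
    rw [List.flatMap_cons, List.nodup_append]
    refine ⟨by simp, ih hp.of_cons, ?_⟩
    intro x hx y hy
    have hx1 : x.1 = a := by
      simp only [List.mem_cons, List.not_mem_nil, or_false] at hx
      rcases hx with rfl | rfl <;> rfl
    have hy1 : a < y.1 := by
      simp only [List.mem_flatMap, List.mem_cons] at hy
      obtain ⟨i, hi, hyi⟩ := hy
      have : a < i := (List.pairwise_cons.mp hp).1 i hi
      simp only [List.not_mem_nil, or_false] at hyi
      rcases hyi with rfl | rfl <;> simpa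
    intro heq
    rw [heq] at hx1
    omega

theorem pv_gens_nodup (n_strands : Int) :
    ((PySem.List.pyRange 1 n_strands 1).flatMap (fun i => [((i : Int), (1 : Int)), (i, -1)])).Nodup :=
  pv_gens_nodup_aux _ (PySem.List.pairwise_lt_pyRange_one 1 n_strands)

-- ===== VERDICT (by name: the statement is the Claim_ definition above) =====
theorem enumerate_braid_words_spec : Claim_equal_enumerate_braid_words := by
  intro n_strands max_len limit _
  unfold Spec_enumerate_braid_words enumerate_braid_words enumerate_braid_words_alt
  simp only []
  rw [pv_gens_eq]
  set gens := (PySem.List.pyRange 1 n_strands 1).flatMap (fun i => [((i : Int), (1 : Int)), (i, -1)])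
    with hgens_def
  have hg : gens.Nodup := pv_gens_nodup n_strands
  have hseen : (PySem.Set.ofList ([[]] : List pvW)) = [[]] := rfl
  rw [hseen]
  rw [pv_sync gens max_len limit hg (limit.toNat + 2) max_len.toNat 0 [[]] [[]] [[]]
    (fun w hw => by
      simp only [List.mem_singleton] at hw
      subst hw
      exact ⟨rfl, by simp [pvRed], by simp, by simp⟩)
    (by simp)
    (fun y hy => by simp only [List.mem_singleton] at hy; subst hy; simp)
    (by omega)
    (by simp)]
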